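-- pv_equiv track=rewrite | github.com/ShuhuaGao/sbcn_mmc | src/example_ara_operon.py | inverse_map
-- ===== SOURCE A (Python) =====
-- def inverse_map(i: int, n: int):
--     """
--     Accumulative STP of logical variables is bijective.
--     Given a result i (\delta_{2^n}^i), find the corresponding logical values.
--
--     :return a list of 0/1
--     """
--     r = []
--     while n > 0:
--         if i % 2 == 0:
--             r.append(0)
--             i = i // 2
--         else:
--             r.append(1)
--             i = (i + 1) // 2
--         n = n - 1
--     r.reverse()
--     return r
-- ===== SOURCE B (Python) =====
-- def inverse_map(i: int, n: int):
--     m = i - 1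
--     return [1 - ((m >> (n - 1 - k)) & 1) for k in range(n)]
-- ===== Notes on version B (the rewrite author's own statement) =====
-- stated objective: simpler
-- what changed: A's stateful halving loop (append LSB-first, ceil-halve i, then reverse) is replaced by a direct comprehension over output positions MSB-first, computing each bit as 1 - ((i-1) >> (n-1-k)) & 1, with no loop state, no branch and no reversal.
import Mathlib
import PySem

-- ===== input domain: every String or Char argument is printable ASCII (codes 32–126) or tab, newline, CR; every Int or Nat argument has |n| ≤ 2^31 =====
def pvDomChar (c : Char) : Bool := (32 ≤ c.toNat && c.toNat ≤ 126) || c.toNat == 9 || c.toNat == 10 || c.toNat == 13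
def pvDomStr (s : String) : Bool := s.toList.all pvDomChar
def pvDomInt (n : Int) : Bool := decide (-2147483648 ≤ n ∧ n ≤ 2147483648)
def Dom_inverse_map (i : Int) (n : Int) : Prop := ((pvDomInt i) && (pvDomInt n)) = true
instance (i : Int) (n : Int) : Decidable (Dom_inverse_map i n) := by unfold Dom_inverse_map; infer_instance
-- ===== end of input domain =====

-- B replaces A's halving loop + final reverse by a direct shift-and-mask comprehension over
-- output positions (MSB first) of i-1; objective: simpler (no loop state, no reversal), same cost.

-- ===== PORT A =====
-- A's while-loop: state (i, n, r); appends a bit per round, halving i (rounding up), until n ≤ 0.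
def invLoopA (i : Int) (n : Int) (r : List Int) : List Int :=
  if _h : n > 0 then
    if PySem.Int.mod i 2 = 0 then
      invLoopA (PySem.Int.floordiv i 2) (n - 1) (r ++ [0])
    else
      invLoopA (PySem.Int.floordiv (i + 1) 2) (n - 1) (r ++ [1])
  else r
termination_by n.toNat
decreasing_by all_goals omega

def inverse_map (i : Int) (n : Int) : List Int :=
  (invLoopA i n []).reverse

-- ===== PORT B =====
-- Source B: m = i - 1; [1 - ((m >> (n - 1 - k)) & 1) for k in range(n)].
-- Python's '>>' is Lean's '>>>' with a Nat shift amount (exact here: n-1-k ≥ 0 for k in range(n));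
-- '& 1' is PySem.Int.band · 1.
def inverse_map_alt (i : Int) (n : Int) : List Int :=
  (PySem.List.pyRange 0 n 1).map (fun k => 1 - PySem.Int.band ((i - 1) >>> (n - 1 - k).toNat) 1)

-- ===== PRECONDITION & SPEC =====
def Spec_inverse_map (i : Int) (n : Int) (out : List Int) : Prop := out = inverse_map_alt i n
instance (i : Int) (n : Int) (out : List Int) : Decidable (Spec_inverse_map i n out) := by unfold Spec_inverse_map; infer_instance

-- ===== CLAIM (what is proved, stated in full; the proofs are below) =====
def Claim_equal_inverse_map : Prop := ∀ (i : Int) (n : Int), Dom_inverse_map i n → Spec_inverse_map i n (inverse_map i n)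

-- ===== LEMMAS AND PROOFS =====

-- the bit both programs compute at distance j (LSB-first) is 1 - ((i-1) / 2^j) % 2
def pvBit (m : Int) (j : Nat) : Int := 1 - m / 2 ^ j % 2

lemma pvBand_one_shift (m : Int) (j : Nat) :
    1 - PySem.Int.band (m >>> j) 1 = pvBit m j := by
  rw [PySem.Int.band_one, PySem.Int.mod_eq_emod_of_pos (by norm_num),
    Int.shiftRight_eq_div_pow, pvBit]
  push_cast
  ring_nf

lemma pvBit_succ (m : Int) (j : Nat) : pvBit m (j + 1) = pvBit (m / 2) j := by
  simp only [pvBit]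
  rw [Int.ediv_ediv_of_nonneg]
  · ring_nf
  · positivity

lemma invLoopA_eq (k : Nat) : ∀ (i : Int) (r : List Int),
    invLoopA i (k : Int) r = r ++ (List.range k).map (pvBit (i - 1)) := by
  induction k with
  | zero => intro i r; rw [invLoopA]; simp
  | succ k ih =>
    intro i r
    rw [invLoopA]
    have hk : ((k + 1 : Nat) : Int) > 0 := by positivity
    rw [dif_pos hk, List.range_succ_eq_map, List.map_cons, List.map_map]
    have hmod : PySem.Int.mod i 2 = i % 2 :=
      PySem.Int.mod_eq_emod_of_pos (by norm_num)
    have hcast : ((k + 1 : Nat) : Int) - 1 = (k : Nat) := by push_cast; ring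
    have hrest : ∀ (i' : Int), i' - 1 = (i - 1) / 2 →
        (List.range k).map (pvBit (i' - 1)) =
        (List.range k).map (pvBit (i - 1) ∘ Nat.succ) := by
      intro i' h
      refine List.map_congr_left (fun j _ => ?_)
      simp only [Function.comp_apply, Nat.succ_eq_add_one, pvBit_succ, h]
    by_cases he : PySem.Int.mod i 2 = 0
    · have hi2 : i % 2 = 0 := by rw [← hmod]; exact he
      rw [if_pos he, hcast, ih]
      have hb0 : pvBit (i - 1) 0 = 0 := by simp only [pvBit]; omega
      have hfd : PySem.Int.floordiv i 2 = i / 2 :=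
        PySem.Int.floordiv_eq_ediv_of_pos (by norm_num)
      rw [hrest _ (by rw [hfd]; omega), hb0]
      simp
    · have hi2 : i % 2 = 1 := by rw [← hmod] at *; have := PySem.Int.mod_nonneg i (b := 2) (by norm_num); have := PySem.Int.mod_lt i (b := 2) (by norm_num); omega
      rw [if_neg he, hcast, ih]
      have hb1 : pvBit (i - 1) 0 = 1 := by simp only [pvBit]; omega
      have hfd : PySem.Int.floordiv (i + 1) 2 = (i + 1) / 2 :=
        PySem.Int.floordiv_eq_ediv_of_pos (by norm_num)
      rw [hrest _ (by rw [hfd]; omega), hb1]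
      simp

-- ===== VERDICT (by name: the statement is the Claim_ definition above) =====
theorem inverse_map_spec : Claim_equal_inverse_map := by
  intro i n _
  unfold Spec_inverse_map inverse_map inverse_map_alt
  rcases (by omega : n ≤ 0 ∨ 0 < n) with hn | hn
  · rw [invLoopA]
    rw [dif_neg (by omega)]
    rw [PySem.List.pyRange_one]
    simp
    omega
  · obtain ⟨k, rfl⟩ : ∃ k : Nat, n = (k : Int) := ⟨n.toNat, by omega⟩
    rw [invLoopA_eq, List.nil_append, PySem.List.pyRange_one]
    have hlen : ((k : Int) - 0).toNat = k := by omega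
    rw [hlen, List.map_map]
    apply List.ext_getElem
    · simp
    · intro t h1 h2
      simp only [List.getElem_reverse, List.getElem_map, List.getElem_range,
        List.length_map, List.length_range, Function.comp_apply]
      have ht : t < k := by simpa using h2
      have hsh : ((k : Int) - 1 - (0 + (t : Int))).toNat = k - 1 - t := by omega
      rw [hsh, pvBand_one_shift]
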